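-- pv_equiv track=rewrite | github.com/yluo3421/Leetcode-Solutions | jiuzhang/1852_final_discounted_price/1852_final_discounted_price_monotonic_stack.py | final_discounted_price
-- ===== SOURCE A (Python) =====
-- from typing import (
--     List,
-- )
--
-- def final_discounted_price(prices: List[int]) -> List[int]:
--     # write your code here
--     # use monotonic stack
--     # 因为每个元素入栈出栈各一次，所以是2O(n)
--     stack = []
--     results = list(prices)
--     for i in range(len(prices)):
--         while stack and prices[stack[-1]] >= prices[i]:
--             results [stack[-1]] = prices[stack[-1]] - prices[i]
--             stack.pop(-1)
--         stack.append(i)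
--     return results
-- ===== SOURCE B (Python) =====
-- def final_discounted_price(prices):
--     # right-to-left DP: nxt[i] = index of first j > i with prices[j] <= prices[i] (n if none),
--     # found by jumping through already-computed nxt pointers
--     n = len(prices)
--     nxt = [n] * n
--     for i in range(n - 1, -1, -1):
--         j = i + 1
--         while j < n and prices[j] > prices[i]:
--             j = nxt[j]
--         nxt[i] = j
--     return [prices[i] - prices[nxt[i]] if nxt[i] < n else prices[i] for i in range(n)]
-- ===== Notes on version B (the rewrite author's own statement) =====
-- stated objective: alternative
-- what changed: Replaces the left-to-right monotonic index stack with a right-to-left DP that fills a next-smaller-or-equal index array by jumping through already-computed pointers, then maps each price to its discounted value; no stack and no in-place patching of a results copy.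
import Mathlib
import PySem

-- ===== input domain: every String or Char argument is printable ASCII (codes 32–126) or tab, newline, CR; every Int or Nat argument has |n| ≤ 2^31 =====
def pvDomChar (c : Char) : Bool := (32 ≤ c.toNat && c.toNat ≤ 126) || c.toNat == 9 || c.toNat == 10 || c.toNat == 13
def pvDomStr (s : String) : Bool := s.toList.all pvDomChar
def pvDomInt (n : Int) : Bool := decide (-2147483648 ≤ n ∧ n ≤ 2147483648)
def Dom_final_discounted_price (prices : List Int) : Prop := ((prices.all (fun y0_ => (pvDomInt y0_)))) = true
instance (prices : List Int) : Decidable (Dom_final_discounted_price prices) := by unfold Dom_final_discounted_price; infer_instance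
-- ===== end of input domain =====

-- B replaces A's left-to-right monotonic stack with a right-to-left jump-pointer DP over a next-smaller-or-equal index array (alternative algorithm, no stack).


-- ===== PORT A =====
-- inner `while stack and prices[stack[-1]] >= prices[i]` loop; stack head = Python stack top
def pvPopLoop (prices : List Int) (i : Nat) : List Nat → List Int → List Nat × List Int
  | [], res => ([], res)
  | t :: st, res =>
    if prices.getD i 0 ≤ prices.getD t 0 then
      pvPopLoop prices i st (res.set t (prices.getD t 0 - prices.getD i 0))
    else (t :: st, res)

def final_discounted_price (prices : List Int) : List Int :=
  ((List.range prices.length).foldl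
    (fun s i =>
      let s' := pvPopLoop prices i s.1 s.2
      (i :: s'.1, s'.2))
    (([] : List Nat), prices)).2

-- ===== PORT B =====
-- inner `while j < n and prices[j] > prices[i]` jump loop; fuel n+1 provably suffices (j strictly increases)
def pvJump (prices : List Int) (x : Int) (nxt : List Nat) : Nat → Nat → Nat
  | 0, j => j
  | fuel+1, j =>
    if j < prices.length ∧ x < prices.getD j 0 then
      pvJump prices x nxt fuel (nxt.getD j prices.length)
    else j

-- the `nxt` array after the right-to-left loop: nxt[i] = first j > i with prices[j] <= prices[i], else n
def pvNxt (prices : List Int) : List Nat :=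
  ((List.range prices.length).reverse).foldl
    (fun nxt i => nxt.set i (pvJump prices (prices.getD i 0) nxt (prices.length+1) (i+1)))
    (List.replicate prices.length prices.length)

def final_discounted_price_alt (prices : List Int) : List Int :=
  (List.range prices.length).map (fun i =>
    if (pvNxt prices).getD i prices.length < prices.length then
      prices.getD i 0 - prices.getD ((pvNxt prices).getD i prices.length) 0
    else prices.getD i 0)

-- ===== PRECONDITION & SPEC =====
def Spec_final_discounted_price (prices : List Int) (out : List Int) : Prop := out = final_discounted_price_alt prices
instance (prices : List Int) (out : List Int) : Decidable (Spec_final_discounted_price prices out) := by unfold Spec_final_discounted_price; infer_instance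

-- ===== CLAIM (what is proved, stated in full; the proofs are below) =====
def Claim_equal_final_discounted_price : Prop := ∀ (prices : List Int), Dom_final_discounted_price prices → Spec_final_discounted_price prices (final_discounted_price prices)

-- ===== LEMMAS AND PROOFS =====

-- `p k` = prices.getD k 0; "no later element in [k+1, i) is ≤ p k"
def pvOpen (p : Nat → Int) (k i : Nat) : Prop := ∀ j, k < j → j < i → p k < p j

-- answer at index k if only elements before index m are visible
def pvAns (p : Nat → Int) (m k : Nat) : Int :=
  match (List.range' (k+1) (m - (k+1))).find? (fun j => decide (p j ≤ p k)) with
  | some j => p k - p j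
  | none => p k

-- ---- B side ----

-- index of the first j > k with p j ≤ p k, or n
def pvFirstHit (p : Nat → Int) (n k : Nat) : Nat :=
  match (List.range' (k+1) (n - (k+1))).find? (fun j => decide (p j ≤ p k)) with
  | some j => j
  | none => n

theorem pvFirstHit_of_some (p : Nat → Int) (n k j : Nat)
    (hf : (List.range' (k+1) (n - (k+1))).find? (fun j => decide (p j ≤ p k)) = some j) :
    pvFirstHit p n k = j := by
  unfold pvFirstHit
  rw [hf]

theorem pvFirstHit_of_none (p : Nat → Int) (n k : Nat)
    (hf : (List.range' (k+1) (n - (k+1))).find? (fun j => decide (p j ≤ p k)) = none) :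
    pvFirstHit p n k = n := by
  unfold pvFirstHit
  rw [hf]

theorem pvFind?_range'_some (q : Nat → Bool) (a len b : Nat)
    (h : (List.range' a len).find? q = some b) :
    q b = true ∧ a ≤ b ∧ b < a + len ∧ ∀ m, a ≤ m → m < b → q m = false := by
  induction len generalizing a with
  | zero => simp [List.range'] at h
  | succ len ih =>
    rw [List.range'_succ] at h
    by_cases hq : q a = true
    · rw [List.find?_cons_of_pos hq] at h
      obtain rfl : a = b := by injection h
      exact ⟨hq, le_refl a, by omega, fun m h1 h2 => absurd h2 (by omega)⟩
    · rw [List.find?_cons_of_neg hq] at h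
      obtain ⟨h1, h2, h3, h4⟩ := ih (a+1) h
      refine ⟨h1, by omega, by omega, ?_⟩
      intro m hm1 hm2
      by_cases hma : m = a
      · subst hma; exact eq_false_of_ne_true hq
      · exact h4 m (by omega) hm2

theorem pvFind?_range'_none (q : Nat → Bool) (a len : Nat)
    (h : ∀ m, a ≤ m → m < a + len → q m = false) :
    (List.range' a len).find? q = none := by
  apply List.find?_eq_none.mpr
  intro j hj
  simp only [List.mem_range'] at hj
  obtain ⟨m, hm, rfl⟩ := hj
  simp [h (a + m) (by omega) (by omega)]

theorem pvFirstHit_gt (p : Nat → Int) (n k : Nat) (hk : k < n) : k < pvFirstHit p n k := by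
  cases hf : (List.range' (k+1) (n - (k+1))).find? (fun j => decide (p j ≤ p k)) with
  | some j =>
    rw [pvFirstHit_of_some p n k j hf]
    have := (pvFind?_range'_some _ _ _ _ hf).2.1
    omega
  | none => rw [pvFirstHit_of_none p n k hf]; omega

theorem pvFirstHit_le (p : Nat → Int) (n k : Nat) : pvFirstHit p n k ≤ n := by
  cases hf : (List.range' (k+1) (n - (k+1))).find? (fun j => decide (p j ≤ p k)) with
  | some j =>
    rw [pvFirstHit_of_some p n k j hf]
    have h1 := (pvFind?_range'_some _ _ _ _ hf).2.1
    have h2 := (pvFind?_range'_some _ _ _ _ hf).2.2.1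
    omega
  | none => rw [pvFirstHit_of_none p n k hf]

theorem pvFirstHit_before (p : Nat → Int) (n k m : Nat)
    (h1 : k < m) (h2 : m < pvFirstHit p n k) (h3 : m < n) : p k < p m := by
  cases hf : (List.range' (k+1) (n - (k+1))).find? (fun j => decide (p j ≤ p k)) with
  | some j =>
    rw [pvFirstHit_of_some p n k j hf] at h2
    have := (pvFind?_range'_some _ _ _ _ hf).2.2.2 m (by omega) h2
    simp only [decide_eq_false_iff_not] at this
    omega
  | none =>
    have := List.find?_eq_none.mp hf m
      (by simp only [List.mem_range']; exact ⟨m - (k+1), by omega, by omega⟩)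
    simp only [decide_eq_true_eq] at this
    omega

theorem pvAns_firstHit (p : Nat → Int) (n k : Nat) :
    pvAns p n k = if pvFirstHit p n k < n then p k - p (pvFirstHit p n k) else p k := by
  cases hf : (List.range' (k+1) (n - (k+1))).find? (fun j => decide (p j ≤ p k)) with
  | some j =>
    have hb1 := (pvFind?_range'_some _ _ _ _ hf).2.1
    have hb2 := (pvFind?_range'_some _ _ _ _ hf).2.2.1
    rw [pvAns, hf, pvFirstHit_of_some p n k j hf, if_pos (by omega)]
  | none => rw [pvAns, hf, pvFirstHit_of_none p n k hf, if_neg (by omega)]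

theorem pvJump_spec (prices : List Int) (i : Nat) (nxt : List Nat)
    (hnxt : ∀ k, i < k →
      nxt.getD k prices.length = pvFirstHit (fun j => prices.getD j 0) prices.length k) :
    ∀ fuel j, i < j → j ≤ prices.length → prices.length + 1 - j ≤ fuel →
    (∀ m, i < m → m < j → prices.getD i 0 < prices.getD m 0) →
    pvJump prices (prices.getD i 0) nxt fuel j
      = pvFirstHit (fun j => prices.getD j 0) prices.length i := by
  intro fuel
  induction fuel with
  | zero => intro j hij hjn hfuel hopen; omega
  | succ fuel ih =>
    intro j hij hjn hfuel hopen
    by_cases hcond : j < prices.length ∧ prices.getD i 0 < prices.getD j 0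
    · simp only [pvJump]
      rw [if_pos hcond, hnxt j (by omega)]
      have hj1 : j < pvFirstHit (fun j => prices.getD j 0) prices.length j :=
        pvFirstHit_gt _ _ _ hcond.1
      have hj2 : pvFirstHit (fun j => prices.getD j 0) prices.length j ≤ prices.length :=
        pvFirstHit_le _ _ _
      apply ih _ (by omega) hj2 (by omega)
      intro m him hmj
      by_cases hmle : m < j
      · exact hopen m him hmle
      · by_cases hmj' : m = j
        · subst hmj'; exact hcond.2
        · have h1 : prices.getD j 0 < prices.getD m 0 :=
            pvFirstHit_before _ _ _ _ (by omega) hmj (by omega)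
          have := hcond.2
          omega
    · simp only [pvJump]
      rw [if_neg hcond]
      by_cases hjn' : j < prices.length
      · have hle : prices.getD j 0 ≤ prices.getD i 0 := by
          by_contra hgt
          exact hcond ⟨hjn', by omega⟩
        have hsplit : List.range' (i+1) (prices.length - (i+1))
            = List.range' (i+1) (j - (i+1)) ++ List.range' j (prices.length - j) := by
          have h := @List.range'_append (i+1) (j - (i+1)) (prices.length - j) 1
          rw [show (i+1) + 1 * (j - (i+1)) = j by omega,
            show (j - (i+1)) + (prices.length - j) = prices.length - (i+1) by omega] at h
          exact h.symm
        have hr : List.range' j (prices.length - j)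
            = j :: List.range' (j+1) (prices.length - j - 1) := by
          rw [show prices.length - j = (prices.length - j - 1) + 1 by omega, List.range'_succ]
          congr 2
        have hfirst : (List.range' (i+1) (j - (i+1))).find?
            (fun m => decide (prices.getD m 0 ≤ prices.getD i 0)) = none := by
          apply pvFind?_range'_none
          intro m h1 h2
          simp only [decide_eq_false_iff_not]
          have := hopen m (by omega) (by omega)
          omega
        symm
        apply pvFirstHit_of_some
        rw [hsplit, List.find?_append, hfirst, Option.none_or, hr,
          List.find?_cons_of_pos (by simpa using hle)]
      · have hj : j = prices.length := by omega
        subst hj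
        symm
        apply pvFirstHit_of_none
        apply pvFind?_range'_none
        intro m h1 h2
        simp only [decide_eq_false_iff_not]
        have := hopen m (by omega) (by omega)
        omega

-- state of the nxt array after processing indices n-1, …, i
def pvNxtFold (prices : List Int) (i : Nat) : List Nat :=
  ((List.range' i (prices.length - i)).reverse).foldl
    (fun nxt k => nxt.set k (pvJump prices (prices.getD k 0) nxt (prices.length+1) (k+1)))
    (List.replicate prices.length prices.length)

theorem pvNxtFold_succ (prices : List Int) (i : Nat) (hi : i < prices.length) :
    pvNxtFold prices i
      = (pvNxtFold prices (i+1)).set i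
          (pvJump prices (prices.getD i 0) (pvNxtFold prices (i+1)) (prices.length+1) (i+1)) := by
  unfold pvNxtFold
  rw [show prices.length - i = (prices.length - (i+1)) + 1 by omega, List.range'_succ,
    List.reverse_cons, List.foldl_append, List.foldl_cons, List.foldl_nil]

def pvNxtInv (prices : List Int) (i : Nat) (nxt : List Nat) : Prop :=
  nxt.length = prices.length ∧
  (∀ k, k < i → nxt.getD k prices.length = prices.length) ∧
  (∀ k, i ≤ k → nxt.getD k prices.length = pvFirstHit (fun j => prices.getD j 0) prices.length k)

theorem pvFirstHit_of_ge (p : Nat → Int) (n k : Nat) (hk : n ≤ k) : pvFirstHit p n k = n := by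
  apply pvFirstHit_of_none
  rw [show n - (k+1) = 0 by omega]
  rfl

theorem pvNxtFold_inv (prices : List Int) :
    ∀ d i, i + d = prices.length → pvNxtInv prices i (pvNxtFold prices i) := by
  intro d
  induction d with
  | zero =>
    intro i hi
    unfold pvNxtFold
    rw [show prices.length - i = 0 by omega]
    simp only [List.range', List.reverse_nil, List.foldl_nil]
    refine ⟨by simp, fun k hk => ?_, fun k hk => ?_⟩
    · rw [List.getD, List.getElem?_replicate]
      split <;> rfl
    · rw [pvFirstHit_of_ge _ _ _ (by omega), List.getD, List.getElem?_replicate]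
      split <;> rfl
  | succ d ih =>
    intro i hi
    have hi' : i < prices.length := by omega
    obtain ⟨hlen, hlo, hhi⟩ := ih (i+1) (by omega)
    rw [pvNxtFold_succ prices i hi']
    have hv : pvJump prices (prices.getD i 0) (pvNxtFold prices (i+1)) (prices.length+1) (i+1)
        = pvFirstHit (fun j => prices.getD j 0) prices.length i := by
      apply pvJump_spec prices i _ (fun k hk => hhi k (by omega)) _ (i+1)
        (by omega) (by omega) (by omega)
      intro m h1 h2
      omega
    refine ⟨by simp [hlen], fun k hk => ?_, fun k hk => ?_⟩
    · have hki : ¬ i = k := by omega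
      rw [List.getD, List.getElem?_set_ne hki, ← List.getD]
      exact hlo k (by omega)
    · by_cases hki : k = i
      · subst hki
        rw [List.getD, List.getElem?_set_self (by omega), Option.getD_some, hv]
      · have hki' : ¬ i = k := fun h => hki h.symm
        rw [List.getD, List.getElem?_set_ne hki', ← List.getD]
        exact hhi k (by omega)

theorem pvNxt_eq_fold (prices : List Int) : pvNxt prices = pvNxtFold prices 0 := by
  unfold pvNxt pvNxtFold
  rw [List.range_eq_range', Nat.sub_zero]

theorem pvAlt_length (prices : List Int) :
    (final_discounted_price_alt prices).length = prices.length := by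
  unfold final_discounted_price_alt
  simp

theorem pvAlt_ans (prices : List Int) (k : Nat) :
    (final_discounted_price_alt prices).getD k 0
      = pvAns (fun j => prices.getD j 0) prices.length k := by
  obtain ⟨hlen, _, hhi⟩ := pvNxtFold_inv prices prices.length 0 (by omega)
  rw [← pvNxt_eq_fold] at hhi
  unfold final_discounted_price_alt
  by_cases hk : k < prices.length
  · have hr : (List.range prices.length)[k]? = some k := by
      simp [hk]
    rw [List.getD, List.getElem?_map, hr]
    simp only [Option.map_some, Option.getD_some]
    rw [hhi k (by omega), pvAns_firstHit]
  · rw [List.getD, List.getElem?_eq_none (by simpa using hk), Option.getD_none]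
    rw [pvAns_firstHit, pvFirstHit_of_ge (fun j => prices.getD j 0) prices.length k (by omega),
      if_neg (by omega), List.getD, List.getElem?_eq_none (by simpa using hk), Option.getD_none]

-- ---- A side ----

-- loop invariant after processing the first i indices
def pvInv (prices : List Int) (i : Nat) (st : List Nat) (res : List Int) : Prop :=
  let p := fun j => prices.getD j 0
  st.Pairwise (· > ·) ∧
  (∀ t ∈ st, t < i ∧ pvOpen p t i) ∧
  (∀ k, k < i → pvOpen p k i → k ∈ st) ∧
  res.length = prices.length ∧
  (∀ k, res.getD k 0 = pvAns p i k)

theorem pvRange_split (i k : Nat) (hk : k < i) :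
    List.range' (k+1) (i+1 - (k+1)) = List.range' (k+1) (i - (k+1)) ++ [i] := by
  have h1 : i + 1 - (k+1) = (i - (k+1)) + 1 := by omega
  rw [h1, List.range'_concat]
  congr 1
  simp
  omega

theorem pvOpen_find?_none (p : Nat → Int) (i k : Nat) (hopen : pvOpen p k i) :
    (List.range' (k+1) (i - (k+1))).find? (fun j => decide (p j ≤ p k)) = none := by
  apply List.find?_eq_none.mpr
  intro j hj
  simp only [List.mem_range'] at hj
  obtain ⟨m, hm, rfl⟩ := hj
  simp only [decide_eq_true_eq]
  have := hopen (k + 1 + 1 * m) (by omega) (by omega)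
  omega

theorem pvAns_succ_hit (p : Nat → Int) (i k : Nat) (hk : k < i)
    (hopen : pvOpen p k i) (hle : p i ≤ p k) :
    pvAns p (i+1) k = p k - p i := by
  rw [pvAns, pvRange_split i k hk, List.find?_append, pvOpen_find?_none p i k hopen]
  simp [hle]

theorem pvAns_succ_miss (p : Nat → Int) (i k : Nat)
    (h : ¬(k < i ∧ pvOpen p k i ∧ p i ≤ p k)) :
    pvAns p (i+1) k = pvAns p i k := by
  by_cases hk : k < i
  · rw [pvAns, pvAns, pvRange_split i k hk, List.find?_append]
    cases hf : (List.range' (k+1) (i - (k+1))).find? (fun j => decide (p j ≤ p k)) with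
    | some j => rfl
    | none =>
      have hopen : pvOpen p k i := by
        intro j h1 h2
        by_contra hle
        have hjm : j ∈ List.range' (k+1) (i - (k+1)) := by
          simp only [List.mem_range']
          exact ⟨j - (k+1), by omega, by omega⟩
        have := List.find?_eq_none.mp hf j hjm
        simp only [decide_eq_true_eq] at this
        omega
      have hle : ¬ p i ≤ p k := fun hle => h ⟨hk, hopen, hle⟩
      simp [hle]
  · have h1 : i + 1 - (k+1) = 0 := by omega
    have h2 : i - (k+1) = 0 := by omega
    rw [pvAns, pvAns, h1, h2]

-- characterization of the inner while loop
theorem pvPopLoop_spec (prices : List Int) (i : Nat) (st : List Nat) :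
    ∀ res : List Int,
    st.Pairwise (· > ·) →
    (∀ t ∈ st, t < i ∧ pvOpen (fun j => prices.getD j 0) t i) →
    (∀ t ∈ st, t < res.length) →
    (pvPopLoop prices i st res).1
        = st.filter (fun t => decide (prices.getD t 0 < prices.getD i 0)) ∧
      (pvPopLoop prices i st res).2.length = res.length ∧
      (∀ k, (pvPopLoop prices i st res).2.getD k 0
          = if k ∈ st ∧ prices.getD i 0 ≤ prices.getD k 0
            then prices.getD k 0 - prices.getD i 0 else res.getD k 0) := by
  induction st with
  | nil =>
    intro res _ _ _
    simp [pvPopLoop]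
  | cons t st ih =>
    intro res hpw hop hlen
    by_cases hge : prices.getD i 0 ≤ prices.getD t 0
    · -- pop t
      have hpw' := hpw.tail
      have hrec := ih (res.set t (prices.getD t 0 - prices.getD i 0)) hpw'
        (fun a ha => hop a (List.mem_cons_of_mem _ ha))
        (by intro a ha; have := hlen a (List.mem_cons_of_mem _ ha); simpa using this)
      obtain ⟨h1, h2, h3⟩ := hrec
      have htlen : t < res.length := hlen t List.mem_cons_self
      refine ⟨?_, ?_, ?_⟩
      · simp only [pvPopLoop, if_pos hge]
        rw [h1, List.filter_cons]
        have hno : (decide (prices.getD t 0 < prices.getD i 0)) = false := by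
          simp only [decide_eq_false_iff_not]
          omega
        rw [hno]
        simp
      · simp only [pvPopLoop, if_pos hge]
        rw [h2]; simp
      · intro k
        simp only [pvPopLoop, if_pos hge]
        rw [h3 k]
        by_cases hkt : k = t
        · subst hkt
          have hknotin : k ∉ st := by
            intro hin
            have := (List.pairwise_cons.mp hpw).1 k hin
            omega
          rw [if_neg (show ¬(k ∈ st ∧ prices.getD i 0 ≤ prices.getD k 0)
                from fun hc => hknotin hc.1),
            if_pos (show k ∈ k :: st ∧ prices.getD i 0 ≤ prices.getD k 0
                from ⟨List.mem_cons_self, hge⟩)]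
          simp [List.getD, htlen]
        · have hkt' : ¬ t = k := fun h => hkt h.symm
          have hset : (res.set t (prices.getD t 0 - prices.getD i 0)).getD k 0
              = res.getD k 0 := by
            simp [List.getD, hkt']
          by_cases hkin : k ∈ st
          · have hmem : k ∈ t :: st := List.mem_cons_of_mem _ hkin
            by_cases hle : prices.getD i 0 ≤ prices.getD k 0
            · rw [if_pos ⟨hkin, hle⟩, if_pos ⟨hmem, hle⟩]
            · rw [if_neg (show ¬(k ∈ st ∧ prices.getD i 0 ≤ prices.getD k 0)
                    from fun hc => hle hc.2),
                if_neg (show ¬(k ∈ t :: st ∧ prices.getD i 0 ≤ prices.getD k 0)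
                    from fun hc => hle hc.2), hset]
          · have hmem : k ∉ t :: st := by simp [hkt, hkin]
            rw [if_neg (show ¬(k ∈ st ∧ prices.getD i 0 ≤ prices.getD k 0)
                    from fun hc => hkin hc.1),
              if_neg (show ¬(k ∈ t :: st ∧ prices.getD i 0 ≤ prices.getD k 0)
                    from fun hc => hmem hc.1), hset]
    · -- stop: head survives, and every deeper element also has p < p i
      have hsurv : ∀ a ∈ t :: st, prices.getD a 0 < prices.getD i 0 := by
        intro a ha
        rcases List.mem_cons.mp ha with rfl | ha
        · omega
        · have hat : a < t := (List.pairwise_cons.mp hpw).1 a ha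
          have hopen := (hop a (List.mem_cons_of_mem _ ha)).2
          have hti : t < i := (hop t List.mem_cons_self).1
          have hlt : prices.getD a 0 < prices.getD t 0 := hopen t (by omega) (by omega)
          omega
      refine ⟨?_, ?_, ?_⟩
      · simp only [pvPopLoop, if_neg hge]
        rw [List.filter_eq_self.mpr (by intro a ha; simpa using hsurv a ha)]
      · simp only [pvPopLoop, if_neg hge]
      · intro k
        simp only [pvPopLoop, if_neg hge]
        by_cases hkin : k ∈ t :: st
        · have hlt := hsurv k hkin
          rw [if_neg (show ¬(k ∈ t :: st ∧ prices.getD i 0 ≤ prices.getD k 0)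
                from fun hc => absurd hc.2 (by omega))]
        · rw [if_neg (show ¬(k ∈ t :: st ∧ prices.getD i 0 ≤ prices.getD k 0)
                from fun hc => hkin hc.1)]

theorem pvInv_step (prices : List Int) (i : Nat) (st : List Nat) (res : List Int)
    (hinv : pvInv prices i st res) (hi : i < prices.length) :
    pvInv prices (i+1) (i :: (pvPopLoop prices i st res).1) (pvPopLoop prices i st res).2 := by
  obtain ⟨hpw, hop, hcomp, hlen, hres⟩ := hinv
  set p := fun j => prices.getD j 0 with hp
  have hlens : ∀ t ∈ st, t < res.length := by
    intro t ht; have := (hop t ht).1; omega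
  obtain ⟨h1, h2, h3⟩ := pvPopLoop_spec prices i st res hpw hop hlens
  refine ⟨?_, ?_, ?_, ?_, ?_⟩
  · rw [h1]
    refine List.pairwise_cons.mpr ⟨?_, hpw.filter _⟩
    intro a ha
    exact (hop a (List.mem_of_mem_filter ha)).1
  · intro t ht
    rcases List.mem_cons.mp ht with rfl | ht
    · exact ⟨by omega, by intro j hj1 hj2; omega⟩
    · rw [h1] at ht
      have hmem := List.mem_of_mem_filter ht
      have hlt := List.of_mem_filter ht
      simp only [decide_eq_true_eq] at hlt
      refine ⟨by have := (hop t hmem).1; omega, ?_⟩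
      intro j hj1 hj2
      by_cases hji : j = i
      · subst hji; exact hlt
      · exact (hop t hmem).2 j hj1 (by omega)
  · intro k hk hkopen
    by_cases hki : k = i
    · subst hki; exact List.mem_cons_self
    · have hk' : k < i := by omega
      have hkopen' : pvOpen p k i := fun j h1 h2 => hkopen j h1 (by omega)
      have hkin := hcomp k hk' hkopen'
      have hkp : p k < p i := hkopen i (by omega) (by omega)
      refine List.mem_cons_of_mem _ ?_
      rw [h1]
      exact List.mem_filter.mpr ⟨hkin, by simpa using hkp⟩
  · rw [h2, hlen]
  · intro k
    rw [h3 k, hres k]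
    by_cases hcase : k ∈ st ∧ prices.getD i 0 ≤ prices.getD k 0
    · have hk := hop k hcase.1
      rw [if_pos hcase, pvAns_succ_hit p i k hk.1 hk.2 hcase.2]
    · rw [if_neg hcase, pvAns_succ_miss p i k]
      rintro ⟨hklt, hkop, hkle⟩
      exact hcase ⟨hcomp k hklt hkop, hkle⟩

theorem pvInv_fold (prices : List Int) (i : Nat) (hi : i ≤ prices.length) :
    pvInv prices i
      ((List.range i).foldl
        (fun s j => let s' := pvPopLoop prices j s.1 s.2; (j :: s'.1, s'.2))
        (([] : List Nat), prices)).1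
      ((List.range i).foldl
        (fun s j => let s' := pvPopLoop prices j s.1 s.2; (j :: s'.1, s'.2))
        (([] : List Nat), prices)).2 := by
  induction i with
  | zero =>
    refine ⟨List.Pairwise.nil, by simp, by intro k h; omega, rfl, ?_⟩
    intro k
    simp [pvAns]
  | succ i ih =>
    have hi' : i ≤ prices.length := by omega
    rw [List.range_succ, List.foldl_append, List.foldl_cons, List.foldl_nil]
    exact pvInv_step prices i _ _ (ih hi') (by omega)

-- ===== VERDICT (by name: the statement is the Claim_ definition above) =====
theorem final_discounted_price_spec : Claim_equal_final_discounted_price := by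
  intro prices _
  unfold Spec_final_discounted_price
  obtain ⟨_, _, _, hlen, hres⟩ := pvInv_fold prices prices.length le_rfl
  have hlenA : (final_discounted_price prices).length = prices.length := hlen
  have hresA : ∀ k, (final_discounted_price prices).getD k 0
      = pvAns (fun j => prices.getD j 0) prices.length k := hres
  apply List.ext_getElem
  · rw [hlenA, pvAlt_length]
  · intro k h1 h2
    rw [← List.getD_eq_getElem _ 0 h1, ← List.getD_eq_getElem _ 0 h2, hresA k, pvAlt_ans]
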